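-- pv_equiv track=rewrite | github.com/Tejas-Chakkarwar/Electric-Era-Challenge | station_uptime.py | calculate_station_uptime
-- ===== SOURCE A (Python) =====
-- from typing import Dict, List, Tuple
--
-- def merge_intervals(intervals: List[Tuple[int, int]]) -> List[Tuple[int, int]]:
--     if not intervals:
--         return []
--
--     # Sort by start time
--     sorted_intervals = sorted(intervals)
--     merged = [sorted_intervals[0]]
--
--     for start, end in sorted_intervals[1:]:
--         last_start, last_end = merged[-1]
--
--         # If current interval overlaps or is adjacent to the last merged interval
--         if start <= last_end:
--             # Extend the last interval if necessary
--             merged[-1] = (last_start, max(last_end, end))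
--         else:
--             merged.append((start, end))
--
--     return merged
--
-- def calculate_total_time(intervals: List[Tuple[int, int]]) -> int:
--     return sum(end - start for start, end in intervals)
--
-- def calculate_station_uptime(
--     stations: Dict[int, List[int]],
--     reports: List[Tuple[int, int, int, bool]]
-- ) -> Dict[int, int]:
--     # Build charger to station mapping
--     charger_to_station: Dict[int, int] = {}
--     for station_id, charger_ids in stations.items():
--         for charger_id in charger_ids:
--             charger_to_station[charger_id] = station_id
--
--     # Group reports by station
--     station_reports: Dict[int, List[Tuple[int, int, bool]]] = {sid: [] for sid in stations}
--
--     for charger_id, start_time, end_time, is_up in reports: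
--         station_id = charger_to_station[charger_id]
--         station_reports[station_id].append((start_time, end_time, is_up))
--
--     # Calculate uptime for each station
--     uptimes: Dict[int, int] = {}
--
--     for station_id, charger_ids in stations.items():
--         reports_for_station = station_reports[station_id]
--
--         if not reports_for_station:
--             # No reports for this station - undefined behavior
--             # We'll set uptime to 0 since there's no data
--             uptimes[station_id] = 0
--             continue
--
--         # Find the overall time period (min start to max end)
--         min_start = min(start for start, end, is_up in reports_for_station)
--         max_end = max(end for start, end, is_up in reports_for_station)
--         total_time = max_end - min_start
--
--         # Collect up intervals
--         up_intervals: List[Tuple[int, int]] = []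
--
--         for start_time, end_time, is_up in reports_for_station:
--             if is_up:
--                 up_intervals.append((start_time, end_time))
--
--         # Merge up intervals to handle overlaps
--         merged_up = merge_intervals(up_intervals)
--
--         # Calculate up time
--         up_time = calculate_total_time(merged_up)
--
--         if total_time == 0:
--             uptimes[station_id] = 0
--         else:
--             # Floor the percentage
--             uptimes[station_id] = int((up_time * 100) // total_time)
--
--     return uptimes
-- ===== SOURCE B (Python) =====
-- from typing import Dict, List, Tuple
--
-- def add_interval(M: List[Tuple[int, int]], s: int, e: int) -> List[Tuple[int, int]]:
--     # Insert one report interval into an ordered, already-merged cluster list,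
--     # keeping it merged (classic online insert-interval; no sorting).
--     stack = []
--     i = 0
--     while i < len(M) and (M[i][0], M[i][1]) < (s, e):
--         stack.append(M[i]); i += 1
--     while i < len(M) and M[i][0] <= e:
--         e = max(e, M[i][1]); i += 1
--     res = [(s, e)] + M[i:]
--     while stack:
--         c, m = stack.pop()
--         c2, m2 = res[0]
--         if c2 <= m:
--             res[0] = (c, max(m, m2))
--         else:
--             res = [(c, m)] + res
--     return res
--
-- def calculate_station_uptime(
--     stations: Dict[int, List[int]],
--     reports: List[Tuple[int, int, int, bool]]
-- ) -> Dict[int, int]: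
--     owner = {c: sid for sid, chargers in stations.items() for c in chargers}
--
--     # One pass over the reports: per station keep running min start / max end and
--     # an online-merged disjoint cluster list of the up intervals.
--     agg: Dict[int, list] = {}
--     for charger_id, start, end, is_up in reports:
--         sid = owner[charger_id]
--         rec = agg.get(sid)
--         if rec is None:
--             rec = agg[sid] = [start, end, []]
--         else:
--             if start < rec[0]:
--                 rec[0] = start
--             if end > rec[1]:
--                 rec[1] = end
--         if is_up:
--             rec[2] = add_interval(rec[2], start, end)
--
--     result: Dict[int, int] = {}
--     for sid in stations:
--         rec = agg.get(sid)
--         if rec is None: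
--             result[sid] = 0
--         else:
--             total = rec[1] - rec[0]
--             result[sid] = 0 if total == 0 else sum(m - c for c, m in rec[2]) * 100 // total
--     return result
-- ===== Notes on version B (the rewrite author's own statement) =====
-- stated objective: alternative
-- what changed: B never sorts: A's per-station collect-reports/sort-up-intervals/sweep-merge pipeline is replaced by a single aggregation pass over the reports that keeps a running min-start/max-end per station and maintains the union of up intervals online, inserting each interval into an ordered disjoint cluster list as it arrives.
import Mathlib
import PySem

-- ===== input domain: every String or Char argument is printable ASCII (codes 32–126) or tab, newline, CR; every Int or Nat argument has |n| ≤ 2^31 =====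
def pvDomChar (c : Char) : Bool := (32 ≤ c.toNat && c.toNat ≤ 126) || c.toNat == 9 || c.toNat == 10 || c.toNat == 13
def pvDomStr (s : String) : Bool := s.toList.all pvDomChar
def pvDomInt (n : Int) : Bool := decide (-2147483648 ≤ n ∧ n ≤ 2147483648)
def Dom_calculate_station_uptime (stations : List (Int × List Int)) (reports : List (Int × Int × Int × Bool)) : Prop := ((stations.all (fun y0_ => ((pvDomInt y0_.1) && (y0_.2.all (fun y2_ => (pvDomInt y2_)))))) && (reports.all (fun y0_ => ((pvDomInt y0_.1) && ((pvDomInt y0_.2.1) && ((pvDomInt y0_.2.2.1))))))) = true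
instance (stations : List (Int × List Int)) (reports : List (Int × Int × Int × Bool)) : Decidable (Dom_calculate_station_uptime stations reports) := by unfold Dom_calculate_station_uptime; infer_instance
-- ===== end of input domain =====

-- B is an alternative implementation: instead of collecting each station's up intervals,
-- sorting them and merging in one sweep, it keeps per station an ordered disjoint cluster
-- list maintained ONLINE by an insert-interval operation (no sorting anywhere), filled in
-- a single aggregation pass over the reports together with the running min start / max end.

-- ===== PORT A =====
-- merge_intervals' loop: 'merged' with its in-place update of merged[-1] is carried as (ls, le)
def pvMergeLoop : List (Int × Int) → Int → Int → List (Int × Int)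
  | [], ls, le => [(ls, le)]
  | (s, e) :: t, ls, le =>
      if s ≤ le then pvMergeLoop t ls (max le e) else (ls, le) :: pvMergeLoop t s e

def merge_intervals (intervals : List (Int × Int)) : List (Int × Int) :=
  match PySem.List.sorted2 intervals (·.1) (·.2) with
  | [] => []
  | (s, e) :: t => pvMergeLoop t s e

def calculate_total_time (intervals : List (Int × Int)) : Int :=
  intervals.foldl (fun acc p => acc + (p.2 - p.1)) 0

-- the grouping step of A: station_reports[charger_to_station[cid]].append(...)
-- (getD _ 0 / getD _ []: Python raises KeyError exactly where the charger is unmapped; Pre_ excludes those inputs)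
def pvStepA (c2s : PySem.Dict Int Int) (d : PySem.Dict Int (List (Int × Int × Bool)))
    (r : Int × Int × Int × Bool) : PySem.Dict Int (List (Int × Int × Bool)) :=
  let sid := c2s.getD r.1 0
  d.insert sid (d.getD sid [] ++ [(r.2.1, r.2.2.1, r.2.2.2)])

-- the body of A's per-station loop
def pvUptimeForA (sr : PySem.Dict Int (List (Int × Int × Bool))) (sid : Int) : Int :=
  let rs := sr.getD sid []
  if rs = [] then 0
  else
    let mn := (PySem.List.min? (rs.map (·.1)) (fun x => x)).getD 0   -- rs ≠ [], so min? is some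
    let mx := (PySem.List.max? (rs.map (·.2.1)) (fun x => x)).getD 0
    let total := mx - mn
    let ups := rs.foldl (fun a t => if t.2.2 then a ++ [(t.1, t.2.1)] else a) []
    let ut := calculate_total_time (merge_intervals ups)
    if total = 0 then 0 else PySem.Int.floordiv (ut * 100) total

def calculate_station_uptime (stations : List (Int × List Int)) (reports : List (Int × Int × Int × Bool)) : List (Int × Int) :=
  let c2s := stations.foldl (fun d p => p.2.foldl (fun d c => d.insert c p.1) d) PySem.Dict.empty
  let sr0 := stations.foldl (fun d p => d.insert p.1 ([] : List (Int × Int × Bool))) PySem.Dict.empty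
  let sr := reports.foldl (pvStepA c2s) sr0
  (stations.foldl (fun u p => u.insert p.1 (pvUptimeForA sr p.1)) PySem.Dict.empty).items

-- ===== PORT B =====
-- the Python tuple comparison (M[i][0], M[i][1]) < (s, e): strict lexicographic order
def pvLtB (a b : Int × Int) : Bool :=
  decide (a.1 < b.1) || (!decide (b.1 < a.1) && decide (a.2 < b.2))

-- Source B's second while loop: absorb clusters the new interval reaches
def pvAbsorb : List (Int × Int) → Int → Int × List (Int × Int)
  | [], e => (e, [])
  | (c, m) :: t, e => if c ≤ e then pvAbsorb t (max e m) else (e, (c, m) :: t)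

-- one unwind step of Source B's stack loop
def pvBackmerge (h : Int × Int) (res : List (Int × Int)) : List (Int × Int) :=
  match res with
  | [] => [h]                         -- unreachable: res is always nonempty
  | (c2, m2) :: r => if c2 ≤ h.2 then (h.1, max h.2 m2) :: r else h :: (c2, m2) :: r

-- Source B's add_interval: walk clusters before (s,e), absorb reached clusters, unwind the stack
def pvAddInterval (M : List (Int × Int)) (s e : Int) : List (Int × Int) :=
  let stack := M.takeWhile (fun p => pvLtB p (s, e))
  let rest := M.dropWhile (fun p => pvLtB p (s, e))
  let a := pvAbsorb rest e
  stack.foldr pvBackmerge ((s, a.1) :: a.2)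

-- one step of B's aggregation, on a report already resolved to its station
def pvAggStep (o : Option (Int × Int × List (Int × Int))) (t : Int × Int × Bool) :
    Option (Int × Int × List (Int × Int)) :=
  match o with
  | none => some (t.1, t.2.1, if t.2.2 then pvAddInterval [] t.1 t.2.1 else [])
  | some (mn, mx, M) =>
      some (if t.1 < mn then t.1 else mn,
            if t.2.1 > mx then t.2.1 else mx,
            if t.2.2 then pvAddInterval M t.1 t.2.1 else M)

def pvStepB (owner : PySem.Dict Int Int) (d : PySem.Dict Int (Int × Int × List (Int × Int)))
    (r : Int × Int × Int × Bool) : PySem.Dict Int (Int × Int × List (Int × Int)) :=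
  let sid := owner.getD r.1 0
  d.insert sid ((pvAggStep (d.get? sid) (r.2.1, r.2.2.1, r.2.2.2)).getD (0, 0, []))

def pvResFor (agg : PySem.Dict Int (Int × Int × List (Int × Int))) (sid : Int) : Int :=
  match agg.get? sid with
  | none => 0
  | some (mn, mx, M) =>
      let total := mx - mn
      if total = 0 then 0 else PySem.Int.floordiv ((M.map (fun p => p.2 - p.1)).sum * 100) total

def calculate_station_uptime_alt (stations : List (Int × List Int)) (reports : List (Int × Int × Int × Bool)) : List (Int × Int) :=
  let owner := stations.foldl (fun d p => p.2.foldl (fun d c => d.insert c p.1) d) PySem.Dict.empty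
  let agg := reports.foldl (pvStepB owner) PySem.Dict.empty
  (stations.foldl (fun u p => u.insert p.1 (pvResFor agg p.1)) PySem.Dict.empty).items

-- ===== PRECONDITION & SPEC =====
-- Pre_ excludes exactly the inputs on which the Python A raises KeyError: a report whose
-- charger id is not listed under any station.
def Pre_calculate_station_uptime (stations : List (Int × List Int)) (reports : List (Int × Int × Int × Bool)) : Prop :=
  ∀ r ∈ reports, ∃ p ∈ stations, r.1 ∈ p.2
instance (stations : List (Int × List Int)) (reports : List (Int × Int × Int × Bool)) : Decidable (Pre_calculate_station_uptime stations reports) := by unfold Pre_calculate_station_uptime; infer_instance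

def pvWitness_calculate_station_uptime : (List (Int × List Int)) × (List (Int × Int × Int × Bool)) :=
  ([(1, [10]), (2, [11, 12])], [(10, 0, 100, true), (11, 0, 50, false), (12, 10, 30, true)])

def Spec_calculate_station_uptime (stations : List (Int × List Int)) (reports : List (Int × Int × Int × Bool)) (out : List (Int × Int)) : Prop := out = calculate_station_uptime_alt stations reports
instance (stations : List (Int × List Int)) (reports : List (Int × Int × Int × Bool)) (out : List (Int × Int)) : Decidable (Spec_calculate_station_uptime stations reports out) := by unfold Spec_calculate_station_uptime; infer_instance

-- ===== CLAIM (what is proved, stated in full; the proofs are below) =====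
def Claim_equal_calculate_station_uptime : Prop := ∀ (stations : List (Int × List Int)) (reports : List (Int × Int × Int × Bool)), Dom_calculate_station_uptime stations reports → Pre_calculate_station_uptime stations reports → Spec_calculate_station_uptime stations reports (calculate_station_uptime stations reports)

-- ===== LEMMAS AND PROOFS =====

-- the order used in the proofs: pvLtB is strict lex order, pvLe its non-strict total companion
def pvLe (a b : Int × Int) : Prop := a.1 < b.1 ∨ (a.1 = b.1 ∧ a.2 ≤ b.2)

theorem pv_ltB_iff (a b : Int × Int) : pvLtB a b = true ↔ (a.1 < b.1 ∨ (a.1 = b.1 ∧ a.2 < b.2)) := by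
  simp [pvLtB]; omega

-- scanning is insensitive to the start of the open cluster (it only lands in the head)
theorem pv_start : ∀ (t : List (Int × Int)) (a a' b : Int),
    pvMergeLoop t a' b = (a', (pvMergeLoop t a b).headI.2) :: (pvMergeLoop t a b).tail := by
  intro t
  induction t with
  | nil => intro a a' b; simp [pvMergeLoop]
  | cons p t ih =>
      intro a a' b
      obtain ⟨s1, e1⟩ := p
      by_cases h : s1 ≤ b
      · simp only [pvMergeLoop, if_pos h]
        exact ih a a' (max b e1)
      · simp only [pvMergeLoop, if_neg h, List.headI, List.tail]

theorem pv_grow : ∀ (t : List (Int × Int)) (a b : Int), b ≤ (pvMergeLoop t a b).headI.2 := by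
  intro t
  induction t with
  | nil => intro a b; simp [pvMergeLoop]
  | cons p t ih =>
      intro a b
      obtain ⟨s1, e1⟩ := p
      by_cases h : s1 ≤ b
      · simp only [pvMergeLoop, if_pos h]
        exact le_trans (le_max_left _ _) (ih a (max b e1))
      · simp only [pvMergeLoop, if_neg h, List.headI]
        exact le_refl b

-- absorbing the merged clusters of t equals scanning (a,b)::t raw
theorem pv_absorb_scan : ∀ (t : List (Int × Int)) (a b s E : Int),
    (s, (pvAbsorb (pvMergeLoop t a b) E).1) :: (pvAbsorb (pvMergeLoop t a b) E).2
      = pvMergeLoop ((a, b) :: t) s E := by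
  intro t
  induction t with
  | nil =>
      intro a b s E
      by_cases h : a ≤ E <;>
        simp [pvMergeLoop, pvAbsorb, h, max_comm]
  | cons p t ih =>
      intro a b s E
      obtain ⟨s1, e1⟩ := p
      by_cases h1 : s1 ≤ b
      · have h1' : s1 ≤ max E b := le_trans h1 (le_max_right _ _)
        simp only [pvMergeLoop, if_pos h1]
        rw [ih a (max b e1) s E]
        by_cases h : a ≤ E
        · simp only [pvMergeLoop, if_pos h, if_pos h1']
          congr 1
          omega
        · simp only [pvMergeLoop, if_neg h]
      · simp only [pvMergeLoop, if_neg h1, pvAbsorb]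
        by_cases h : a ≤ E
        · simp only [if_pos h]
          rw [ih s1 e1 s (max E b)]
          simp only [pvMergeLoop]
        · simp only [if_neg h]

-- inserting an interval strictly before the open cluster: pure absorption
theorem pv_add_before (t : List (Int × Int)) (s0 e0 s e : Int) (h : pvLtB (s, e) (s0, e0) = true) :
    pvAddInterval (pvMergeLoop t s0 e0) s e = pvMergeLoop ((s0, e0) :: t) s e := by
  have hlt := (pv_ltB_iff (s, e) (s0, e0)).mp h
  have hM := pv_start t s0 s0 e0
  have hgrow := pv_grow t s0 e0
  have hpred : pvLtB ((s0 : Int), (pvMergeLoop t s0 e0).headI.2) (s, e) = false := by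
    rw [← Bool.not_eq_true, pv_ltB_iff]
    simp only [not_or, not_and, not_lt]
    constructor
    · omega
    · intro hh; omega
  unfold pvAddInterval
  rw [hM, List.takeWhile_cons_of_neg (by simp [hpred]),
      List.dropWhile_cons_of_neg (by simp [hpred]), List.foldr_nil, ← hM]
  exact pv_absorb_scan t s0 e0 s e

theorem pv_le_of_ltB {a b : Int × Int} (h : pvLtB a b = true) : pvLe a b := by
  have := (pv_ltB_iff a b).mp h; unfold pvLe; omega

theorem pv_le_of_not_ltB {a b : Int × Int} (h : ¬ pvLtB a b = true) : pvLe b a := by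
  rw [pv_ltB_iff] at h; unfold pvLe; omega

theorem pv_le_trans {a b c : Int × Int} (h1 : pvLe a b) (h2 : pvLe b c) : pvLe a c := by
  unfold pvLe at *; omega

theorem pv_insert_pairwise (l : List (Int × Int)) (x : Int × Int)
    (h : List.Pairwise pvLe l) : List.Pairwise pvLe (PySem.List.insertBy pvLtB x l) := by
  induction l with
  | nil => simp [PySem.List.insertBy]
  | cons y ys ih =>
      rw [List.pairwise_cons] at h
      by_cases hb : pvLtB x y = true
      · simp only [PySem.List.insertBy, if_pos hb]
        rw [List.pairwise_cons]
        refine ⟨?_, List.pairwise_cons.mpr h⟩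
        intro z hz
        rcases List.mem_cons.mp hz with hz | hz
        · subst hz; exact pv_le_of_ltB hb
        · exact pv_le_trans (pv_le_of_ltB hb) (h.1 z hz)
      · simp only [PySem.List.insertBy, if_neg hb]
        rw [List.pairwise_cons]
        refine ⟨?_, ih h.2⟩
        intro z hz
        rcases (PySem.List.mem_insertBy pvLtB x z ys).mp hz with hz | hz
        · subst hz; exact pv_le_of_not_ltB hb
        · exact h.1 z hz


theorem pv_le_antisymm {a b : Int × Int} (h1 : pvLe a b) (h2 : pvLe b a) : a = b := by
  unfold pvLe at h1 h2
  have : a.1 = b.1 ∧ a.2 = b.2 := by omega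
  exact Prod.ext this.1 this.2

theorem pv_ltB_le_trans {a b c : Int × Int} (h1 : pvLtB a b = true) (h2 : pvLe b c) :
    pvLtB a c = true := by
  rw [pv_ltB_iff] at h1 ⊢
  unfold pvLe at h2
  omega

theorem pv_insert_head (x y : Int × Int) (l : List (Int × Int)) (h : pvLtB x y = true)
    (hl : ∀ z ∈ l, pvLe y z) : PySem.List.insertBy pvLtB x l = x :: l := by
  cases l with
  | nil => rfl
  | cons z zs =>
      have : pvLtB x z = true := pv_ltB_le_trans h (hl z (List.mem_cons_self))
      simp only [PySem.List.insertBy, if_pos this]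

theorem pv_add_cons_pos (c m s e : Int) (R : List (Int × Int))
    (h : pvLtB (c, m) (s, e) = true) :
    pvAddInterval ((c, m) :: R) s e = pvBackmerge (c, m) (pvAddInterval R s e) := by
  unfold pvAddInterval
  rw [List.takeWhile_cons_of_pos (by simpa using h), List.dropWhile_cons_of_pos (by simpa using h),
      List.foldr_cons]

theorem pv_add_cons_neg (c m s e : Int) (R : List (Int × Int))
    (h : pvLtB (c, m) (s, e) = false) :
    pvAddInterval ((c, m) :: R) s e
      = (s, (pvAbsorb ((c, m) :: R) e).1) :: (pvAbsorb ((c, m) :: R) e).2 := by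
  unfold pvAddInterval
  rw [List.takeWhile_cons_of_neg (by simp [h]), List.dropWhile_cons_of_neg (by simp [h]),
      List.foldr_nil]

theorem pv_pw_merge {s0 e0 s1 e1 : Int} {t' : List (Int × Int)}
    (hpw : List.Pairwise pvLe ((s0, e0) :: (s1, e1) :: t')) :
    List.Pairwise pvLe ((s0, max e0 e1) :: t') := by
  rw [List.pairwise_cons] at hpw
  obtain ⟨h0, hpw1⟩ := hpw
  rw [List.pairwise_cons] at hpw1
  obtain ⟨h1, hpw2⟩ := hpw1
  rw [List.pairwise_cons]
  refine ⟨?_, hpw2⟩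
  intro y hy
  have ha := h0 y (List.mem_cons_of_mem _ hy)
  have hb := h1 y hy
  have hc := h0 (s1, e1) List.mem_cons_self
  unfold pvLe at *
  simp only at *
  omega

-- inserting a duplicate of a degenerate (end < start) cluster
theorem pv_dupneg (t' : List (Int × Int)) (s1 e1 : Int)
    (hpw : List.Pairwise pvLe ((s1, e1) :: t')) (hneg : e1 < s1) :
    pvMergeLoop (PySem.List.insertBy pvLtB (s1, e1) t') s1 e1
      = (s1, e1) :: pvMergeLoop t' s1 e1 := by
  induction t' with
  | nil =>
      simp only [PySem.List.insertBy, pvMergeLoop, if_neg (by omega : ¬ s1 ≤ e1)]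
  | cons y t'' ih =>
      rw [List.pairwise_cons] at hpw
      obtain ⟨h1, hpw1⟩ := hpw
      by_cases hb : pvLtB (s1, e1) y = true
      · simp only [PySem.List.insertBy, if_pos hb, pvMergeLoop, if_neg (by omega : ¬ s1 ≤ e1)]
      · have hy' : y = (s1, e1) := pv_le_antisymm (pv_le_of_not_ltB hb) (h1 y List.mem_cons_self)
        subst hy'
        simp only [PySem.List.insertBy, if_neg hb]
        have hpw' : List.Pairwise pvLe ((s1, e1) :: t'') := by
          rw [List.pairwise_cons]
          exact ⟨fun z hz => h1 z (List.mem_cons_of_mem _ hz), hpw1.sublist (List.sublist_cons_self _ _)⟩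
        simp only [pvMergeLoop, if_neg (by omega : ¬ s1 ≤ e1)]
        rw [ih hpw']

-- the main induction: inserting an interval at-or-after the open cluster
theorem pv_G2 : ∀ (t : List (Int × Int)) (s0 e0 s e : Int),
    List.Pairwise pvLe ((s0, e0) :: t) → pvLe (s0, e0) (s, e) →
    pvAddInterval (pvMergeLoop t s0 e0) s e
      = pvMergeLoop (PySem.List.insertBy pvLtB (s, e) t) s0 e0 := by
  intro t
  induction t with
  | nil =>
      intro s0 e0 s e hpw hle
      have HLE : s0 < s ∨ (s0 = s ∧ e0 ≤ e) := hle
      by_cases hb : pvLtB (s0, e0) (s, e) = true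
      · rw [show pvMergeLoop [] s0 e0 = [(s0, e0)] from rfl, pv_add_cons_pos s0 e0 s e [] hb,
            show pvAddInterval [] s e = [(s, e)] from rfl]
        simp only [PySem.List.insertBy]
        by_cases h3 : s ≤ e0 <;> simp [pvBackmerge, pvMergeLoop, h3]
      · have heq : (s0, e0) = (s, e) := pv_le_antisymm hle (pv_le_of_not_ltB hb)
        have hs : s0 = s := congrArg Prod.fst heq
        have he : e0 = e := congrArg Prod.snd heq
        subst hs he
        rw [Bool.not_eq_true] at hb
        rw [show pvMergeLoop [] s0 e0 = [(s0, e0)] from rfl, pv_add_cons_neg s0 e0 s0 e0 [] hb]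
        simp only [PySem.List.insertBy, pvAbsorb, pvMergeLoop]
        by_cases h3 : s0 ≤ e0 <;> simp [h3]
  | cons p t' ih =>
      intro s0 e0 s e hpw hle
      obtain ⟨s1, e1⟩ := p
      have h01 : pvLe (s0, e0) (s1, e1) := (List.pairwise_cons.mp hpw).1 _ List.mem_cons_self
      have hpw1 : List.Pairwise pvLe ((s1, e1) :: t') := (List.pairwise_cons.mp hpw).2
      have h1t : ∀ y ∈ t', pvLe (s1, e1) y := fun y hy => (List.pairwise_cons.mp hpw1).1 y hy
      have H01 : s0 < s1 ∨ (s0 = s1 ∧ e0 ≤ e1) := h01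
      have HLE : s0 < s ∨ (s0 = s ∧ e0 ≤ e) := hle
      by_cases hA : s1 ≤ e0
      · -- the head of t merges into the open cluster
        rw [show pvMergeLoop ((s1, e1) :: t') s0 e0 = pvMergeLoop t' s0 (max e0 e1) from by
          simp [pvMergeLoop, hA]]
        have hpw' : List.Pairwise pvLe ((s0, max e0 e1) :: t') := pv_pw_merge hpw
        by_cases hxa : pvLtB (s, e) (s0, max e0 e1) = true
        · -- the new interval still starts inside the merged cluster
          rw [pv_add_before t' s0 (max e0 e1) s e hxa]
          have HXA : s < s0 ∨ (s = s0 ∧ e < max e0 e1) := (pv_ltB_iff _ _).mp hxa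
          have hins : pvLtB (s, e) (s1, e1) = true := by rw [pv_ltB_iff]; simp only; omega
          rw [show PySem.List.insertBy pvLtB (s, e) ((s1, e1) :: t')
              = (s, e) :: (s1, e1) :: t' from by simp [PySem.List.insertBy, hins]]
          have hs0e : s0 ≤ e := by omega
          have hse0 : s ≤ e0 := by omega
          rw [show pvMergeLoop ((s0, max e0 e1) :: t') s e = pvMergeLoop t' s (max e (max e0 e1)) from by
            simp [pvMergeLoop, hs0e]]
          rw [show pvMergeLoop ((s, e) :: (s1, e1) :: t') s0 e0
              = pvMergeLoop ((s1, e1) :: t') s0 (max e0 e) from by simp [pvMergeLoop, hse0]]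
          rw [show pvMergeLoop ((s1, e1) :: t') s0 (max e0 e)
              = pvMergeLoop t' s0 (max (max e0 e) e1) from by
            simp only [pvMergeLoop]; rw [if_pos (by omega)]]
          have hss : s = s0 := by omega
          subst hss
          congr 1
          omega
        · have hxb : pvLe (s0, max e0 e1) (s, e) := pv_le_of_not_ltB hxa
          rw [ih s0 (max e0 e1) s e hpw' hxb]
          by_cases hI : pvLtB (s, e) (s1, e1) = true
          · rw [pv_insert_head _ _ _ hI h1t]
            rw [show PySem.List.insertBy pvLtB (s, e) ((s1, e1) :: t')
                = (s, e) :: (s1, e1) :: t' from by simp [PySem.List.insertBy, hI]]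
            have HI : s < s1 ∨ (s = s1 ∧ e < e1) := (pv_ltB_iff _ _).mp hI
            have hse0 : s ≤ e0 := by omega
            rw [show pvMergeLoop ((s, e) :: t') s0 (max e0 e1)
                = pvMergeLoop t' s0 (max (max e0 e1) e) from by
              simp only [pvMergeLoop]; rw [if_pos (by omega)]]
            rw [show pvMergeLoop ((s, e) :: (s1, e1) :: t') s0 e0
                = pvMergeLoop ((s1, e1) :: t') s0 (max e0 e) from by simp [pvMergeLoop, hse0]]
            rw [show pvMergeLoop ((s1, e1) :: t') s0 (max e0 e)
                = pvMergeLoop t' s0 (max (max e0 e) e1) from by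
              simp only [pvMergeLoop]; rw [if_pos (by omega)]]
            congr 1
            omega
          · rw [show PySem.List.insertBy pvLtB (s, e) ((s1, e1) :: t')
                = (s1, e1) :: PySem.List.insertBy pvLtB (s, e) t' from by
              simp [PySem.List.insertBy, hI]]
            simp [pvMergeLoop, hA]
      · -- the head of t opens a new cluster after (s0, e0)
        rw [show pvMergeLoop ((s1, e1) :: t') s0 e0 = (s0, e0) :: pvMergeLoop t' s1 e1 from by
          simp [pvMergeLoop, hA]]
        by_cases hb0 : pvLtB (s0, e0) (s, e) = true
        · rw [pv_add_cons_pos s0 e0 s e _ hb0]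
          have HB0 : s0 < s ∨ (s0 = s ∧ e0 < e) := (pv_ltB_iff _ _).mp hb0
          by_cases hI : pvLtB (s, e) (s1, e1) = true
          · -- the new interval goes between the open cluster and the head of t
            rw [pv_add_before t' s1 e1 s e hI]
            rw [show PySem.List.insertBy pvLtB (s, e) ((s1, e1) :: t')
                = (s, e) :: (s1, e1) :: t' from by simp [PySem.List.insertBy, hI]]
            have HI : s < s1 ∨ (s = s1 ∧ e < e1) := (pv_ltB_iff _ _).mp hI
            by_cases hse0 : s ≤ e0
            · by_cases hs1e : s1 ≤ e
              · rw [show pvMergeLoop ((s1, e1) :: t') s e = pvMergeLoop t' s (max e e1) from by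
                  simp [pvMergeLoop, hs1e]]
                have h1 := pv_start t' s s (max e e1)
                have h2 := pv_start t' s s0 (max e e1)
                have hg := pv_grow t' s (max e e1)
                rw [h1, show pvBackmerge (s0, e0)
                      ((s, (pvMergeLoop t' s (max e e1)).headI.2) :: (pvMergeLoop t' s (max e e1)).tail)
                    = (s0, max e0 (pvMergeLoop t' s (max e e1)).headI.2)
                        :: (pvMergeLoop t' s (max e e1)).tail from by simp [pvBackmerge, hse0]]
                rw [show pvMergeLoop ((s, e) :: (s1, e1) :: t') s0 e0
                    = pvMergeLoop ((s1, e1) :: t') s0 (max e0 e) from by simp [pvMergeLoop, hse0]]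
                rw [show pvMergeLoop ((s1, e1) :: t') s0 (max e0 e)
                    = pvMergeLoop t' s0 (max (max e0 e) e1) from by
                  simp only [pvMergeLoop]; rw [if_pos (by omega)]]
                rw [show max (max e0 e) e1 = max e e1 from by omega, h2,
                    show max e0 (pvMergeLoop t' s (max e e1)).headI.2
                      = (pvMergeLoop t' s (max e e1)).headI.2 from by omega]
              · rw [show pvMergeLoop ((s1, e1) :: t') s e = (s, e) :: pvMergeLoop t' s1 e1 from by
                  simp [pvMergeLoop, hs1e]]
                rw [show pvBackmerge (s0, e0) ((s, e) :: pvMergeLoop t' s1 e1)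
                    = (s0, max e0 e) :: pvMergeLoop t' s1 e1 from by simp [pvBackmerge, hse0]]
                rw [show pvMergeLoop ((s, e) :: (s1, e1) :: t') s0 e0
                    = pvMergeLoop ((s1, e1) :: t') s0 (max e0 e) from by simp [pvMergeLoop, hse0]]
                rw [show pvMergeLoop ((s1, e1) :: t') s0 (max e0 e)
                    = (s0, max e0 e) :: pvMergeLoop t' s1 e1 from by
                  simp only [pvMergeLoop]; rw [if_neg (by omega)]]
            · have hshape := pv_start ((s1, e1) :: t') s s e
              have hbm : pvBackmerge (s0, e0) (pvMergeLoop ((s1, e1) :: t') s e)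
                  = (s0, e0) :: pvMergeLoop ((s1, e1) :: t') s e := by
                conv_lhs => rw [hshape]
                conv_rhs => rw [hshape]
                simp [pvBackmerge, hse0]
              rw [hbm]
              rw [show pvMergeLoop ((s, e) :: (s1, e1) :: t') s0 e0
                  = (s0, e0) :: pvMergeLoop ((s1, e1) :: t') s e from by simp [pvMergeLoop, hse0]]
          · -- the new interval belongs after the head of t: recurse there
            have hle1 : pvLe (s1, e1) (s, e) := pv_le_of_not_ltB hI
            rw [ih s1 e1 s e hpw1 hle1]
            have hshape := pv_start (PySem.List.insertBy pvLtB (s, e) t') s1 s1 e1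
            have hbm : pvBackmerge (s0, e0) (pvMergeLoop (PySem.List.insertBy pvLtB (s, e) t') s1 e1)
                = (s0, e0) :: pvMergeLoop (PySem.List.insertBy pvLtB (s, e) t') s1 e1 := by
              conv_lhs => rw [hshape]
              conv_rhs => rw [hshape]
              simp [pvBackmerge, hA]
            rw [hbm]
            rw [show PySem.List.insertBy pvLtB (s, e) ((s1, e1) :: t')
                = (s1, e1) :: PySem.List.insertBy pvLtB (s, e) t' from by
              simp [PySem.List.insertBy, hI]]
            simp [pvMergeLoop, hA]
        · -- the new interval equals the open cluster
          have heq : (s0, e0) = (s, e) := pv_le_antisymm hle (pv_le_of_not_ltB hb0)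
          have hs : s0 = s := congrArg Prod.fst heq
          have he : e0 = e := congrArg Prod.snd heq
          subst hs he
          rw [Bool.not_eq_true] at hb0
          rw [pv_add_cons_neg s0 e0 s0 e0 _ hb0]
          by_cases hnn : s0 ≤ e0
          · have hshape := pv_start t' s1 s1 e1
            have habs : pvAbsorb ((s0, e0) :: pvMergeLoop t' s1 e1) e0
                = (e0, pvMergeLoop t' s1 e1) := by
              simp only [pvAbsorb, if_pos hnn, max_self]
              conv_lhs => rw [hshape]
              conv_rhs => rw [hshape]
              simp [pvAbsorb, hA]
            rw [habs]
            have hI2 : pvLtB (s0, e0) (s1, e1) = true := by rw [pv_ltB_iff]; simp only; omega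
            rw [show PySem.List.insertBy pvLtB (s0, e0) ((s1, e1) :: t')
                = (s0, e0) :: (s1, e1) :: t' from by simp [PySem.List.insertBy, hI2]]
            rw [show pvMergeLoop ((s0, e0) :: (s1, e1) :: t') s0 e0
                = pvMergeLoop ((s1, e1) :: t') s0 (max e0 e0) from by simp [pvMergeLoop, hnn]]
            rw [show pvMergeLoop ((s1, e1) :: t') s0 (max e0 e0)
                = (s0, max e0 e0) :: pvMergeLoop t' s1 e1 from by
              simp only [pvMergeLoop]; rw [if_neg (by omega)]]
            rw [max_self]
          · have habs : pvAbsorb ((s0, e0) :: pvMergeLoop t' s1 e1) e0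
                = (e0, (s0, e0) :: pvMergeLoop t' s1 e1) := by
              simp [pvAbsorb, hnn]
            rw [habs]
            by_cases hI2 : pvLtB (s0, e0) (s1, e1) = true
            · rw [show PySem.List.insertBy pvLtB (s0, e0) ((s1, e1) :: t')
                  = (s0, e0) :: (s1, e1) :: t' from by simp [PySem.List.insertBy, hI2]]
              rw [show pvMergeLoop ((s0, e0) :: (s1, e1) :: t') s0 e0
                  = (s0, e0) :: pvMergeLoop ((s1, e1) :: t') s0 e0 from by simp [pvMergeLoop, hnn]]
              rw [show pvMergeLoop ((s1, e1) :: t') s0 e0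
                  = (s0, e0) :: pvMergeLoop t' s1 e1 from by simp [pvMergeLoop, hA]]
            · have heq1 : (s0, e0) = (s1, e1) := pv_le_antisymm h01 (pv_le_of_not_ltB hI2)
              have hs1 : s0 = s1 := congrArg Prod.fst heq1
              have he1 : e0 = e1 := congrArg Prod.snd heq1
              subst hs1 he1
              rw [show PySem.List.insertBy pvLtB (s0, e0) ((s0, e0) :: t')
                  = (s0, e0) :: PySem.List.insertBy pvLtB (s0, e0) t' from by
                simp [PySem.List.insertBy, hI2]]
              rw [show pvMergeLoop ((s0, e0) :: PySem.List.insertBy pvLtB (s0, e0) t') s0 e0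
                  = (s0, e0) :: pvMergeLoop (PySem.List.insertBy pvLtB (s0, e0) t') s0 e0 from by
                simp [pvMergeLoop, hnn]]
              rw [pv_dupneg t' s0 e0 hpw1 (by omega)]

-- scan of a (sorted) list, as A's merge_intervals does after sorting
def pvScan (L : List (Int × Int)) : List (Int × Int) :=
  match L with
  | [] => []
  | (s, e) :: t => pvMergeLoop t s e

theorem pv_M1 (S : List (Int × Int)) (x : Int × Int) (hpw : List.Pairwise pvLe S) :
    pvAddInterval (pvScan S) x.1 x.2 = pvScan (PySem.List.insertBy pvLtB x S) := by
  obtain ⟨s, e⟩ := x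
  cases S with
  | nil => rfl
  | cons p t =>
      obtain ⟨s0, e0⟩ := p
      by_cases hb : pvLtB (s, e) (s0, e0) = true
      · simp only [PySem.List.insertBy, if_pos hb, pvScan]
        exact pv_add_before t s0 e0 s e hb
      · simp only [PySem.List.insertBy, if_neg hb, pvScan]
        exact pv_G2 t s0 e0 s e hpw (pv_le_of_not_ltB hb)

theorem pv_sorted2_pairwise (xs : List (Int × Int)) :
    List.Pairwise pvLe (PySem.List.sorted2 xs (·.1) (·.2)) := by
  have hrfl : PySem.List.sorted2 xs (·.1) (·.2)
      = xs.foldl (fun acc y => PySem.List.insertBy pvLtB y acc) [] := rfl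
  rw [hrfl]
  have : ∀ (ys : List (Int × Int)) (acc : List (Int × Int)), List.Pairwise pvLe acc →
      List.Pairwise pvLe (ys.foldl (fun acc y => PySem.List.insertBy pvLtB y acc) acc) := by
    intro ys
    induction ys with
    | nil => intro acc h; simpa using h
    | cons y ys ih =>
        intro acc h
        simp only [List.foldl_cons]
        exact ih _ (pv_insert_pairwise acc y h)
  exact this xs [] List.Pairwise.nil

theorem pv_sorted2_append (xs : List (Int × Int)) (x : Int × Int) :
    PySem.List.sorted2 (xs ++ [x]) (·.1) (·.2)
      = PySem.List.insertBy pvLtB x (PySem.List.sorted2 xs (·.1) (·.2)) := by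
  simp only [PySem.List.sorted2, List.foldl_append]
  rfl

-- folding B's online insertion over the raw list equals A's sort-then-merge
theorem pv_fold_add (ups : List (Int × Int)) :
    ups.foldl (fun M p => pvAddInterval M p.1 p.2) [] = merge_intervals ups := by
  have hscan : ∀ l : List (Int × Int), merge_intervals l = pvScan (PySem.List.sorted2 l (·.1) (·.2)) := by
    intro l; rfl
  induction ups using List.reverseRecOn with
  | nil => rfl
  | append_singleton xs x ih =>
      rw [List.foldl_append, List.foldl_cons, List.foldl_nil, ih, hscan, hscan,
          pv_sorted2_append]
      exact pv_M1 _ x (pv_sorted2_pairwise xs)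

-- ===== station-level plumbing =====

def pvProj (r : Int × Int × Int × Bool) : Int × Int × Bool := (r.2.1, r.2.2.1, r.2.2.2)

-- the reports of station sid, projected the way both programs store them
def pvG (owner : PySem.Dict Int Int) (sid : Int) (rs : List (Int × Int × Int × Bool)) :
    List (Int × Int × Bool) :=
  (rs.filter (fun r => owner.getD r.1 0 == sid)).map pvProj

theorem pv_min_eq (a b : Int) : min a b = if b < a then b else a := by
  rw [min_def]; split_ifs <;> omega

theorem pv_max_eq (a b : Int) : max a b = if b > a then b else a := by
  rw [max_def]; split_ifs <;> omega

theorem pv_aggStep_some (o : Option (Int × Int × List (Int × Int))) (t : Int × Int × Bool) :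
    pvAggStep o t = some ((pvAggStep o t).getD (0, 0, [])) := by
  cases o with
  | none => rfl
  | some v => obtain ⟨mn, mx, ups⟩ := v; rfl

theorem pv_seed_getD (st : List (Int × List Int)) :
    ∀ (d : PySem.Dict Int (List (Int × Int × Bool))) (sid : Int), d.getD sid [] = [] →
    (st.foldl (fun d p => d.insert p.1 ([] : List (Int × Int × Bool))) d).getD sid [] = [] := by
  induction st with
  | nil => intro d sid h; simpa using h
  | cons p st ih =>
      intro d sid h
      simp only [List.foldl_cons]
      exact ih _ _ (by rw [PySem.Dict.getD_insert]; split_ifs <;> simp [h])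

theorem pv_groupA (c2s : PySem.Dict Int Int) (rs : List (Int × Int × Int × Bool)) :
    ∀ (d : PySem.Dict Int (List (Int × Int × Bool))) (sid : Int),
    (rs.foldl (pvStepA c2s) d).getD sid [] = d.getD sid [] ++ pvG c2s sid rs := by
  induction rs with
  | nil => intro d sid; simp [pvG]
  | cons r rs ih =>
      intro d sid
      simp only [List.foldl_cons, ih, pvG, List.filter_cons]
      by_cases h : c2s.getD r.1 0 = sid
      · simp only [h, beq_self_eq_true, if_pos, List.map_cons]
        unfold pvStepA
        rw [h, PySem.Dict.getD_insert, if_pos rfl]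
        simp [pvProj]
      · have hb : (c2s.getD r.1 0 == sid) = false := beq_eq_false_iff_ne.mpr h
        simp only [hb, Bool.false_eq_true, if_false]
        unfold pvStepA
        rw [PySem.Dict.getD_insert, if_neg (by simpa using fun hh => h hh.symm)]

theorem pv_groupB (owner : PySem.Dict Int Int) (rs : List (Int × Int × Int × Bool)) :
    ∀ (d : PySem.Dict Int (Int × Int × List (Int × Int))) (sid : Int),
    (rs.foldl (pvStepB owner) d).get? sid = (pvG owner sid rs).foldl pvAggStep (d.get? sid) := by
  induction rs with
  | nil => intro d sid; simp [pvG]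
  | cons r rs ih =>
      intro d sid
      simp only [List.foldl_cons, ih, pvG, List.filter_cons]
      by_cases h : owner.getD r.1 0 = sid
      · simp only [h, beq_self_eq_true, if_pos, List.map_cons]
        unfold pvStepB
        rw [h, PySem.Dict.get?_insert, if_pos rfl, ← pv_aggStep_some]
        simp [pvProj]
      · have hb : (owner.getD r.1 0 == sid) = false := beq_eq_false_iff_ne.mpr h
        simp only [hb, Bool.false_eq_true, if_false]
        unfold pvStepB
        rw [PySem.Dict.get?_insert, if_neg (by simpa using fun hh => h hh.symm)]

theorem pv_foldAgg_some (ts : List (Int × Int × Bool)) : ∀ (mn mx : Int) (M : List (Int × Int)),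
    ts.foldl pvAggStep (some (mn, mx, M)) = some
      (ts.foldl (fun a t => if t.1 < a then t.1 else a) mn,
       ts.foldl (fun a t => if t.2.1 > a then t.2.1 else a) mx,
       ts.foldl (fun M t => if t.2.2 then pvAddInterval M t.1 t.2.1 else M) M) := by
  induction ts with
  | nil => intro mn mx M; rfl
  | cons t ts ih =>
      intro mn mx M
      simp only [List.foldl_cons, pvAggStep, ih]

-- both per-report folds over the filtered up reports, written as folds over the same list
theorem pv_if_fold (ts : List (Int × Int × Bool)) : ∀ (M : List (Int × Int)),
    ts.foldl (fun M t => if t.2.2 then pvAddInterval M t.1 t.2.1 else M) M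
      = ((ts.filter (fun t => t.2.2)).map (fun t => (t.1, t.2.1))).foldl
          (fun M p => pvAddInterval M p.1 p.2) M := by
  induction ts with
  | nil => intro M; rfl
  | cons t ts ih =>
      intro M
      by_cases h : t.2.2 = true <;> simp [h, ih]

theorem pv_if_append (ts : List (Int × Int × Bool)) : ∀ (a : List (Int × Int)),
    ts.foldl (fun a t => if t.2.2 then a ++ [(t.1, t.2.1)] else a) a
      = a ++ (ts.filter (fun t => t.2.2)).map (fun t => (t.1, t.2.1)) := by
  induction ts with
  | nil => intro a; simp
  | cons t ts ih =>
      intro a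
      by_cases h : t.2.2 = true <;> simp [h, ih]

theorem pv_per_sid (sr : PySem.Dict Int (List (Int × Int × Bool)))
    (agg : PySem.Dict Int (Int × Int × List (Int × Int))) (sid : Int)
    (l : List (Int × Int × Bool)) (h1 : sr.getD sid [] = l)
    (h2 : agg.get? sid = l.foldl pvAggStep none) :
    pvUptimeForA sr sid = pvResFor agg sid := by
  unfold pvUptimeForA pvResFor
  rw [h1, h2]
  cases l with
  | nil => rfl
  | cons t ts =>
      have hstep : pvAggStep none t =
          some (t.1, t.2.1, if t.2.2 then pvAddInterval [] t.1 t.2.1 else []) := rfl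
      rw [List.foldl_cons, hstep, pv_foldAgg_some]
      have hB : ts.foldl (fun M t => if t.2.2 then pvAddInterval M t.1 t.2.1 else M)
            (if t.2.2 then pvAddInterval [] t.1 t.2.1 else [])
          = (t :: ts).foldl (fun M t => if t.2.2 then pvAddInterval M t.1 t.2.1 else M) [] := rfl
      have hA : (t :: ts).foldl (fun a t => if t.2.2 then a ++ [(t.1, t.2.1)] else a) []
          = ((t :: ts).filter (fun t => t.2.2)).map (fun t => (t.1, t.2.1)) := by
        rw [pv_if_append]; simp
      rw [hB, pv_if_fold, pv_fold_add]
      simp only [List.map_cons, PySem.List.min?_id_cons, PySem.List.max?_id_cons,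
        Option.getD_some, List.foldl_map, if_neg (List.cons_ne_nil t ts), hA]
      have hsum : ∀ M : List (Int × Int), (M.map (fun p => p.2 - p.1)).sum = calculate_total_time M := by
        intro M
        rw [List.sum_eq_foldl, List.foldl_map]
        rfl
      simp only [pv_min_eq, pv_max_eq, hsum]

-- ===== VERDICT (by name: the statement is the Claim_ definition above) =====
theorem calculate_station_uptime_spec : Claim_equal_calculate_station_uptime := by
  intro stations reports _hdom _hpre
  unfold Spec_calculate_station_uptime calculate_station_uptime calculate_station_uptime_alt
  have hv : ∀ sid : Int,
      pvUptimeForA (reports.foldl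
          (pvStepA (stations.foldl (fun d p => p.2.foldl (fun d c => d.insert c p.1) d) PySem.Dict.empty))
          (stations.foldl (fun d p => d.insert p.1 ([] : List (Int × Int × Bool))) PySem.Dict.empty)) sid
      = pvResFor (reports.foldl
          (pvStepB (stations.foldl (fun d p => p.2.foldl (fun d c => d.insert c p.1) d) PySem.Dict.empty))
          PySem.Dict.empty) sid := by
    intro sid
    apply pv_per_sid _ _ sid
      (pvG (stations.foldl (fun d p => p.2.foldl (fun d c => d.insert c p.1) d) PySem.Dict.empty) sid reports)
    · rw [pv_groupA]
      rw [pv_seed_getD stations PySem.Dict.empty sid (PySem.Dict.getD_empty sid [])]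
      simp
    · rw [pv_groupB]
      rw [PySem.Dict.get?_empty]
  simp only [hv]
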